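-- pv_equiv track=rewrite | github.com/supersciencegrl/AoC | 2024/day08.py | find_antennae
-- ===== SOURCE A (Python) =====
-- def find_antennae(grid: list[str]
--                   ) -> dict[str, list[tuple[int, int]]]:
--     """
--     Identifies and stores the positions of antennae in a grid based on their frequency markers.
--
--     This function scans through a grid and collects coordinates of all antenna positions,
--     grouping them by their frequency markers. Each unique marker is used as a key in the returned
--     dictionary, with the value being a list of tuples representing the coordinates of the antennae.
--
--     Args:
--         grid (list[str]): A list of strings representing the grid, where each string is a row.
--                           Each character in the grid represents an antenna frequency marker or
--                           an empty position ('.').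
--
--     Returns:
--         dict[str, list[tuple[int, int]]]: A dictionary where keys are frequency markers and values
--                                           are lists of tuples, each tuple representing the (x, y)
--                                           coordinates of antennae on that frequency.
--     """
--     antennae = {}
--     # Iterate through grid to search for antennae
--     for y, line in enumerate(grid):
--         for x, posn in enumerate(line):
--             if posn != '.':
--                 try:
--                     # If we already have antennae on this frequency
--                     antennae[posn].append((x,y))
--                 except KeyError: # First antenna on this frequency
--                     antennae[posn] = [(x,y)]
--
--     return antennae
-- ===== SOURCE B (Python) =====
-- def find_antennae(grid):
--     entries = [(ch, (x, y))
--                for y, line in enumerate(grid)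
--                for x, ch in enumerate(line)
--                if ch != '.']
--     markers = list(dict.fromkeys(ch for ch, _ in entries))
--     return {ch: [pos for c, pos in entries if c == ch] for ch in markers}
-- ===== Notes on version B (the rewrite author's own statement) =====
-- stated objective: alternative
-- what changed: Replaces the incremental scan-with-dict-insert/append grouping by a materialize-then-group pipeline: flatten the grid to a flat (marker, (x,y)) entry list, dedup the markers in first-occurrence order, and build each marker's coordinate list by filtering the entry list.
import Mathlib
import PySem

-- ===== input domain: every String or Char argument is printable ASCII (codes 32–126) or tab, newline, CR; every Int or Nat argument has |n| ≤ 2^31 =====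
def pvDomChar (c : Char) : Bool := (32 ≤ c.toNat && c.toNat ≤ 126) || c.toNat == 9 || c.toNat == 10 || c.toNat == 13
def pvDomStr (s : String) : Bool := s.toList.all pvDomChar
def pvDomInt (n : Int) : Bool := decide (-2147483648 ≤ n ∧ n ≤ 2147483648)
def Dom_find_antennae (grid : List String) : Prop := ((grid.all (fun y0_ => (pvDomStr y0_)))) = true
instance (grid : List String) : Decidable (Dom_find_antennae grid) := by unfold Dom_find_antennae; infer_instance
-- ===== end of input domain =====

-- B groups by materialize-then-group (flat entry list, deduped marker order, per-marker filter)
-- instead of A's incremental dict insert/append scan; same cost, different decomposition.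

-- ===== PORT A =====
-- A: scan the grid with nested enumerate, maintaining a dict; try-append / except-KeyError-insert.
def find_antennae (grid : List String) : List (String × List (Int × Int)) :=
  ((PySem.List.enumerate grid).foldl (fun antennae yl =>
      (PySem.List.enumerate yl.2.toList).foldl (fun d xc =>
        if String.mk [xc.2] != "." then
          match d.get? (String.mk [xc.2]) with
          | some lst => d.insert (String.mk [xc.2]) (lst ++ [(xc.1, yl.1)])  -- try: append
          | none => d.insert (String.mk [xc.2]) [(xc.1, yl.1)]              -- except KeyError
        else d) antennae)
    (PySem.Dict.empty : PySem.Dict String (List (Int × Int)))).items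

-- ===== PORT B =====
-- entries = [(ch, (x, y)) for y, line in enumerate(grid) for x, ch in enumerate(line) if ch != '.']
def faEntries (grid : List String) : List (String × (Int × Int)) :=
  (PySem.List.enumerate grid).flatMap (fun yl =>
    ((PySem.List.enumerate yl.2.toList).filter (fun xc => String.mk [xc.2] != ".")).map
      (fun xc => (String.mk [xc.2], (xc.1, yl.1))))

def find_antennae_alt (grid : List String) : List (String × List (Int × Int)) :=
  let entries := faEntries grid
  let markers := PySem.List.dedup (entries.map (fun e => e.1))   -- list(dict.fromkeys(...))
  markers.map (fun ch => (ch, ((entries.filter (fun e => e.1 == ch)).map (fun e => e.2))))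

-- ===== PRECONDITION & SPEC =====
def Spec_find_antennae (grid : List String) (out : List (String × List (Int × Int))) : Prop := out = find_antennae_alt grid
instance (grid : List String) (out : List (String × List (Int × Int))) : Decidable (Spec_find_antennae grid out) := by unfold Spec_find_antennae; infer_instance

-- ===== CLAIM (what is proved, stated in full; the proofs are below) =====
def Claim_equal_find_antennae : Prop := ∀ (grid : List String), Dom_find_antennae grid → Spec_find_antennae grid (find_antennae grid)

-- ===== LEMMAS AND PROOFS =====

-- A's try/except body is exactly dict-modify with default [].
theorem faStep_eq_modify (d : PySem.Dict String (List (Int × Int))) (k : String) (p : Int × Int) :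
    (match d.get? k with
     | some lst => d.insert k (lst ++ [p])
     | none => d.insert k [p]) = d.modify k [] (· ++ [p]) := by
  cases h : d.get? k <;>
    simp [PySem.Dict.modify, PySem.Dict.getD_eq_get?_getD, h]

theorem foldl_flatMap' {α β γ : Type} (g : α → List β) (xs : List α) (f : γ → β → γ) (a : γ) :
    (xs.flatMap g).foldl f a = xs.foldl (fun a x => (g x).foldl f a) a := by
  induction xs generalizing a <;> simp [*]

-- inner loop of A over one line = fold of the line's filtered/mapped entries
theorem fa_inner (y : Int) (l : List (Int × Char)) (d : PySem.Dict String (List (Int × Int))) :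
    l.foldl (fun d xc =>
        if String.mk [xc.2] != "." then
          match d.get? (String.mk [xc.2]) with
          | some lst => d.insert (String.mk [xc.2]) (lst ++ [(xc.1, y)])
          | none => d.insert (String.mk [xc.2]) [(xc.1, y)]
        else d) d
      = ((l.filter (fun xc => String.mk [xc.2] != ".")).map
          (fun xc => (String.mk [xc.2], (xc.1, y)))).foldl
          (fun d p => d.modify p.1 [] (· ++ [p.2])) d := by
  induction l generalizing d with
  | nil => rfl
  | cons x xs ih =>
    simp only [List.foldl_cons, List.filter_cons]
    by_cases h : (String.mk [x.2] != ".") = true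
    · rw [if_pos h, if_pos h, List.map_cons, List.foldl_cons, ← faStep_eq_modify]
      exact ih _
    · rw [if_neg h, if_neg h]
      exact ih _

theorem fa_eq_fold_entries (grid : List String) :
    find_antennae grid =
      ((faEntries grid).foldl (fun d p => d.modify p.1 [] (· ++ [p.2]))
        (PySem.Dict.empty : PySem.Dict String (List (Int × Int)))).items := by
  unfold find_antennae faEntries
  rw [foldl_flatMap']
  congr 2
  funext d yl
  exact fa_inner yl.1 (PySem.List.enumerate yl.2.toList) d

theorem keys_fold_entries (es : List (String × (Int × Int)))
    (d : PySem.Dict String (List (Int × Int))) :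
    (es.foldl (fun d p => d.modify p.1 [] (· ++ [p.2])) d).keys
      = PySem.Set.update d.keys (es.map (fun e => e.1)) := by
  induction es generalizing d with
  | nil => rfl
  | cons e es ih =>
    simp only [List.foldl_cons, List.map_cons, PySem.Set.update, ih]
    congr 1
    rw [PySem.Dict.keys_modify]
    by_cases h : d.contains e.1
    · rw [PySem.Dict.keys_insert_of_contains _ _ h]
      simp [PySem.Set.add, PySem.Set.contains, PySem.Dict.contains_eq_decide_mem_keys] at h ⊢
      simp [h]
    · rw [PySem.Dict.keys_insert_of_not_contains _ _ (by simpa using h)]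
      simp [PySem.Set.add, PySem.Set.contains, PySem.Dict.contains_eq_decide_mem_keys] at h ⊢
      simp [h]

theorem items_eq_map_keys (d : PySem.Dict String (List (Int × Int))) (hn : d.keys.Nodup) :
    d.items = d.keys.map (fun k => (k, d.getD k [])) := by
  have h : d.items.map (fun p => (p.1, d.getD p.1 [])) = d.items.map id := by
    apply List.map_congr_left
    intro p hp
    simp [PySem.Dict.getD_of_mem_items d (k := p.1) (v := p.2) (by simpa using hp) hn]
  unfold PySem.Dict.keys
  rw [List.map_map]
  simpa [Function.comp] using h.symm

theorem find_antennae_spec' (grid : List String) :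
    find_antennae grid = find_antennae_alt grid := by
  rw [fa_eq_fold_entries]
  have hkeys := keys_fold_entries (faEntries grid) PySem.Dict.empty
  rw [items_eq_map_keys _ (by
    rw [hkeys]
    simpa [PySem.Dict.keys_empty, PySem.Set.ofList] using
      PySem.Set.nodup_ofList ((faEntries grid).map (fun e => e.1)))]
  rw [hkeys]
  unfold find_antennae_alt
  simp only [PySem.List.dedup_eq_ofList]
  have : PySem.Set.update (PySem.Dict.empty : PySem.Dict String (List (Int × Int))).keys
      ((faEntries grid).map (fun e => e.1))
      = PySem.Set.ofList ((faEntries grid).map (fun e => e.1)) := by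
    simp [PySem.Dict.keys_empty, PySem.Set.ofList, PySem.Set.update]
  rw [this]
  apply List.map_congr_left
  intro ch _
  rw [PySem.Dict.getD_foldl_modify_append]
  simp [PySem.Dict.getD_empty]

-- ===== VERDICT (by name: the statement is the Claim_ definition above) =====
theorem find_antennae_spec : Claim_equal_find_antennae := by
  intro grid _
  unfold Spec_find_antennae
  exact find_antennae_spec' grid
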